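-- pv_equiv track=rewrite | github.com/katrjnass/method_ELECTRE_I | electre.py | zovnishna_stiykist
-- ===== SOURCE A (Python) =====
-- def zovnishna_stiykist(X, matrix_R):  # перевірка чи відповідає розв’язок властивості зовнішньої стійкості
--     mnoshina = []
--
--     for j in range(len(matrix_R)):
--         if j not in X:
--             mnoshina.append(j)   # множина усіх елементів, що не входять в X
--     for k in mnoshina:
--         flag = False
--         for j in range(len(matrix_R)):
--             if matrix_R[j][k] == 1 and j in X:  # якщо є хоча б одна одиниця в рядках з множини X
--                 flag = True
--         if not flag:
--             return False
--     return True
-- ===== SOURCE B (Python) =====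
-- def zovnishna_stiykist(X, matrix_R):
--     n = len(matrix_R)
--     covered = set()
--     for j, row in enumerate(matrix_R):
--         if j in X:
--             for k, v in enumerate(row[:n]):
--                 if v == 1:
--                     covered.add(k)
--     return all(k in X or k in covered for k in range(n))
-- ===== Notes on version B (the rewrite author's own statement) =====
-- stated objective: alternative
-- what changed: Instead of rescanning every row once per uncovered column, B makes one forward pass over the rows in X recording every column they dominate into a set, then a single membership-check pass over all columns; B iterates rows by their actual length, so it is total where A raises IndexError on ragged matrices (excluded by Pre_).
import Mathlib
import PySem

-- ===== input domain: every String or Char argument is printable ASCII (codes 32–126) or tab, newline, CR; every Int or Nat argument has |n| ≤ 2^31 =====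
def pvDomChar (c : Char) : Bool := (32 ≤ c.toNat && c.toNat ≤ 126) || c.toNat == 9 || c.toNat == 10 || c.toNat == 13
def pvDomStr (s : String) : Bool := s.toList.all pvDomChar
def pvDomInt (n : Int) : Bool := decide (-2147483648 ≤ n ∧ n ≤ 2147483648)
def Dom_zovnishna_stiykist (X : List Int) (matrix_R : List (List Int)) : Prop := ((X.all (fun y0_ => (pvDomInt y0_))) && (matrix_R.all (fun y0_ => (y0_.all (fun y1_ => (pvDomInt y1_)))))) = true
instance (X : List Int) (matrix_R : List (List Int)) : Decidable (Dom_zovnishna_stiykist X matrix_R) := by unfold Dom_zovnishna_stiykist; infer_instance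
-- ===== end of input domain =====

-- B replaces A's per-uncovered-column rescan of all rows by one forward pass over
-- the rows in X recording every dominated column into a set, then one check pass
-- (objective: alternative decomposition, same asymptotic cost).

-- ===== PORT A =====
-- matrix_R[j][k]: inside Pre_ every access A performs is in range; getD 0 is the totalization.
def pvCellA (matrix_R : List (List Int)) (j k : Nat) : Int :=
  (matrix_R.getD j []).getD k 0

-- inner 'for j in range(n): if matrix_R[j][k]==1 and j in X: flag = True'
def pvFlagA (X : List Int) (matrix_R : List (List Int)) (n k : Nat) : Bool :=
  (List.range n).foldl
    (fun flag j => if pvCellA matrix_R j k == 1 && X.contains (Int.ofNat j) then true else flag)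
    false

-- 'for k in mnoshina: … if not flag: return False' / final 'return True'
def pvLoopA (X : List Int) (matrix_R : List (List Int)) (n : Nat) : List Nat → Bool
  | [] => true
  | k :: ks => if pvFlagA X matrix_R n k then pvLoopA X matrix_R n ks else false

def zovnishna_stiykist (X : List Int) (matrix_R : List (List Int)) : Bool :=
  let n := matrix_R.length
  let mnoshina := (List.range n).filter (fun j => !(X.contains (Int.ofNat j)))
  pvLoopA X matrix_R n mnoshina

-- ===== PORT B =====
-- forward pass: for j, row in enumerate(matrix_R): if j in X: for k, v in enumerate(row[:n]): if v == 1: covered.add(k)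
def pvCovered (X : List Int) (matrix_R : List (List Int)) : PySem.Set Int :=
  (PySem.List.enumerate matrix_R).foldl
    (fun cov jr =>
      if X.contains jr.1 then
        (PySem.List.enumerate (PySem.List.slice jr.2 none (some (matrix_R.length : Int)))).foldl
          (fun cov kv => if kv.2 == 1 then PySem.Set.add cov kv.1 else cov)
          cov
      else cov)
    PySem.Set.empty

-- 'return all(k in X or k in covered for k in range(n))'
def zovnishna_stiykist_alt (X : List Int) (matrix_R : List (List Int)) : Bool :=
  let n := matrix_R.length
  let covered := pvCovered X matrix_R
  (List.range n).all (fun k => X.contains (Int.ofNat k) || PySem.Set.contains covered (Int.ofNat k))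

-- ===== PRECONDITION & SPEC =====
-- Pre_ excludes exactly the ragged matrices on which A raises IndexError: an uncovered
-- column index k sticking out past some row is reached (and indexed) by A unless some
-- smaller uncovered column k' already fails the domination check first.  B is total.
def Pre_zovnishna_stiykist (X : List Int) (matrix_R : List (List Int)) : Prop :=
  ∀ k ∈ List.range matrix_R.length, X.contains (Int.ofNat k) = false →
    (∃ row ∈ matrix_R, row.length ≤ k) →
    ∃ k' ∈ List.range k, X.contains (Int.ofNat k') = false ∧
      ∀ j ∈ List.range matrix_R.length, X.contains (Int.ofNat j) = true → (matrix_R.getD j []).getD k' 0 ≠ 1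
instance (X : List Int) (matrix_R : List (List Int)) : Decidable (Pre_zovnishna_stiykist X matrix_R) := by unfold Pre_zovnishna_stiykist; infer_instance
def pvWitness_zovnishna_stiykist : List Int × List (List Int) := ([0], [[1, 1], [0, 0]])

def Spec_zovnishna_stiykist (X : List Int) (matrix_R : List (List Int)) (out : Bool) : Prop := out = zovnishna_stiykist_alt X matrix_R
instance (X : List Int) (matrix_R : List (List Int)) (out : Bool) : Decidable (Spec_zovnishna_stiykist X matrix_R out) := by unfold Spec_zovnishna_stiykist; infer_instance

-- ===== CLAIM (what is proved, stated in full; the proofs are below) =====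
def Claim_equal_zovnishna_stiykist : Prop := ∀ (X : List Int) (matrix_R : List (List Int)), Dom_zovnishna_stiykist X matrix_R → Pre_zovnishna_stiykist X matrix_R → Spec_zovnishna_stiykist X matrix_R (zovnishna_stiykist X matrix_R)

-- ===== LEMMAS AND PROOFS =====

-- A's flag accumulator computes an 'any' over range n
theorem pvFoldl_if_true {α : Type} (p : α → Bool) (l : List α) (b : Bool) :
    l.foldl (fun flag j => if p j then true else flag) b = (b || l.any p) := by
  induction l generalizing b with
  | nil => simp
  | cons x xs ih =>
    rw [List.foldl_cons, ih]
    by_cases h : p x = true <;> simp [h, List.any_cons]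

theorem pvFlagA_iff (X : List Int) (matrix_R : List (List Int)) (n k : Nat) :
    pvFlagA X matrix_R n k = true ↔
      ∃ j < n, pvCellA matrix_R j k = 1 ∧ X.contains (Int.ofNat j) = true := by
  unfold pvFlagA
  rw [pvFoldl_if_true]
  simp [List.any_eq_true, List.mem_range]

-- A's outer loop is an 'all'
theorem pvLoopA_eq (X : List Int) (matrix_R : List (List Int)) (n : Nat) (ks : List Nat) :
    pvLoopA X matrix_R n ks = ks.all (pvFlagA X matrix_R n) := by
  induction ks with
  | nil => rfl
  | cons k ks ih =>
    simp only [pvLoopA, List.all_cons]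
    by_cases h : pvFlagA X matrix_R n k = true <;> simp [h, ih]

-- membership after B's inner fold: the columns whose entry is 1 are added
theorem pvMem_covered_inner (l : List (Int × Int)) (cov : PySem.Set Int) (k : Int) :
    k ∈ l.foldl (fun cov kv => if kv.2 == 1 then PySem.Set.add cov kv.1 else cov) cov ↔
      k ∈ cov ∨ (k, (1 : Int)) ∈ l := by
  induction l generalizing cov with
  | nil => simp
  | cons x xs ih =>
    simp only [List.foldl_cons]
    rw [ih]
    by_cases h : x.2 = 1
    · simp only [h, BEq.rfl, if_pos, PySem.Set.mem_add, List.mem_cons]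
      constructor
      · rintro (⟨hc | he⟩ | hm)
        · exact Or.inl hc
        · exact Or.inr (Or.inl (by rcases x with ⟨a, b⟩; simp_all))
        · exact Or.inr (Or.inr hm)
      · rintro (hc | hx | hm)
        · exact Or.inl (Or.inl hc)
        · exact Or.inl (Or.inr (by rcases x with ⟨a, b⟩; simp_all))
        · exact Or.inr hm
    · have hb : (x.2 == 1) = false := by simp [h]
      rw [hb]
      simp only [Bool.false_eq_true, if_false, List.mem_cons]
      constructor
      · rintro (hc | hm)
        · exact Or.inl hc
        · exact Or.inr (Or.inr hm)
      · rintro (hc | hx | hm)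
        · exact Or.inl hc
        · exact absurd (congrArg Prod.snd hx.symm) (by simpa using h)
        · exact Or.inr hm

-- membership after B's outer fold
theorem pvMem_covered_aux (X : List Int) (matrix_R : List (List Int))
    (l : List (Int × List Int)) (cov : PySem.Set Int) (k : Int) :
    k ∈ l.foldl
        (fun cov jr =>
          if X.contains jr.1 then
            (PySem.List.enumerate (PySem.List.slice jr.2 none (some (matrix_R.length : Int)))).foldl
              (fun cov kv => if kv.2 == 1 then PySem.Set.add cov kv.1 else cov) cov
          else cov) cov ↔
      k ∈ cov ∨ ∃ jr ∈ l, X.contains jr.1 = true ∧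
        (k, (1 : Int)) ∈ PySem.List.enumerate (PySem.List.slice jr.2 none (some (matrix_R.length : Int))) := by
  induction l generalizing cov with
  | nil => simp
  | cons x xs ih =>
    simp only [List.foldl_cons]
    by_cases h : X.contains x.1 = true
    · rw [if_pos h, ih, pvMem_covered_inner]
      simp only [List.mem_cons]
      aesop
    · rw [if_neg h, ih]
      aesop

-- membership of a column in the enumeration of a truncated row
theorem pvMem_enum_take (row : List Int) (n k : Nat) :
    (Int.ofNat k, (1 : Int)) ∈ PySem.List.enumerate (row.take n) ↔
      k < n ∧ row.getD k 0 = 1 := by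
  rw [PySem.List.mem_enumerate_iff]
  constructor
  · rintro ⟨i, hi, hik⟩
    have hki : k = i := by
      have := congrArg Prod.fst hik
      simp only [zero_add, Int.ofNat_eq_natCast] at this
      exact_mod_cast this
    subst hki
    have hlen : k < min n row.length := by simpa [List.length_take] using hi
    have hv : (row.take n)[k]'hi = 1 := by
      have := congrArg Prod.snd hik
      simpa using this.symm
    rw [List.getElem_take] at hv
    exact ⟨lt_min_iff.mp hlen |>.1,
      by rw [List.getD_eq_getElem _ _ (lt_min_iff.mp hlen).2]; exact hv⟩
  · rintro ⟨hkn, hcell⟩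
    have hkr : k < row.length := by
      by_contra hge
      push Not at hge
      rw [List.getD_eq_default _ _ hge] at hcell
      norm_num at hcell
    have hlen : k < (row.take n).length := by simp [List.length_take]; omega
    refine ⟨k, hlen, ?_⟩
    have hv : (row.take n)[k]'hlen = row[k]'hkr := List.getElem_take
    have : row[k]'hkr = 1 := by rwa [List.getD_eq_getElem _ _ hkr] at hcell
    simp [hv, this]

-- characterisation of B's covered set in terms of A's cell accessor
theorem pvMem_covered (X : List Int) (matrix_R : List (List Int)) (k : Nat) :
    Int.ofNat k ∈ pvCovered X matrix_R ↔
      ∃ j ∈ List.range matrix_R.length, X.contains (Int.ofNat j) = true ∧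
        k < matrix_R.length ∧ pvCellA matrix_R j k = 1 := by
  unfold pvCovered
  rw [pvMem_covered_aux]
  simp only [PySem.Set.empty, List.not_mem_nil, false_or, List.mem_range]
  constructor
  · rintro ⟨jr, hjr, hx, hk⟩
    rw [PySem.List.mem_enumerate_iff] at hjr
    obtain ⟨j, hj, rfl⟩ := hjr
    rw [PySem.List.slice_to_natCast] at hk
    simp only [zero_add] at hk hx
    rw [pvMem_enum_take] at hk
    refine ⟨j, hj, by exact_mod_cast hx, hk.1, ?_⟩
    unfold pvCellA
    rw [List.getD_eq_getElem _ _ hj]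
    exact hk.2
  · rintro ⟨j, hj, hx, hkn, hcell⟩
    refine ⟨(0 + (j : Int), matrix_R[j]'hj), ?_, by simpa using hx, ?_⟩
    · rw [PySem.List.mem_enumerate_iff]
      exact ⟨j, hj, rfl⟩
    · rw [PySem.List.slice_to_natCast]
      simp only
      rw [pvMem_enum_take]
      refine ⟨hkn, ?_⟩
      unfold pvCellA at hcell
      rwa [List.getD_eq_getElem _ _ hj] at hcell

theorem pvAll_congr_mem {α : Type} (l : List α) (p q : α → Bool)
    (h : ∀ a ∈ l, p a = q a) : l.all p = l.all q := by
  induction l with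
  | nil => rfl
  | cons x xs ih =>
    simp only [List.all_cons]
    rw [h x (List.mem_cons_self), ih (fun a ha => h a (List.mem_cons_of_mem _ ha))]

-- ===== VERDICT (by name: the statement is the Claim_ definition above) =====
theorem zovnishna_stiykist_spec : Claim_equal_zovnishna_stiykist := by
  intro X matrix_R _hDom _hPre
  unfold Spec_zovnishna_stiykist zovnishna_stiykist zovnishna_stiykist_alt
  simp only
  rw [pvLoopA_eq]
  rw [List.all_filter]
  refine pvAll_congr_mem _ _ _ (fun k hk => ?_)
  simp only [List.mem_range] at hk
  by_cases hx : X.contains (Int.ofNat k) = true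
  · simp_all
  · simp only [hx, Bool.not_false, Bool.false_or]
    have hcov : PySem.Set.contains (pvCovered X matrix_R) (Int.ofNat k) = true ↔
        Int.ofNat k ∈ pvCovered X matrix_R := PySem.Set.contains_iff _ _
    rcases h : pvFlagA X matrix_R matrix_R.length k with _ | _
    · rcases hc : PySem.Set.contains (pvCovered X matrix_R) (Int.ofNat k) with _ | _
      · rfl
      · exfalso
        have := hcov.mp hc
        rw [pvMem_covered] at this
        obtain ⟨j, hj, hjx, _, hcell⟩ := this
        simp only [List.mem_range] at hj
        have : pvFlagA X matrix_R matrix_R.length k = true :=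
          (pvFlagA_iff _ _ _ _).mpr ⟨j, hj, hcell, hjx⟩
        simp [h] at this
    · have := (pvFlagA_iff _ _ _ _).mp h
      obtain ⟨j, hj, hcell, hjx⟩ := this
      have : Int.ofNat k ∈ pvCovered X matrix_R :=
        (pvMem_covered _ _ _).mpr ⟨j, List.mem_range.mpr hj, hjx, hk, hcell⟩
      simp
      exact this
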